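-- pv_equiv track=rewrite | github.com/pypi-data/pypi-mirror-403 | packages/macer/macer-0.2.0.tar.gz/macer-0.2.0/macer/phonopy/band_path.py | _build_label_chain
-- ===== SOURCE A (Python) =====
-- def _build_label_chain(path_segments):
--     if not path_segments:
--         return []
--     chain = []
--     s0, e0 = path_segments[0]
--     chain.append(s0); chain.append(e0)
--     for (s, e) in path_segments[1:]:
--         if chain[-1] != s:
--             chain.append(s)
--         chain.append(e)
--     dedup = [chain[0]]
--     for lab in chain[1:]:
--         if lab != dedup[-1]:
--             dedup.append(lab)
--     return dedup
-- ===== SOURCE B (Python) =====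
-- def _build_label_chain(path_segments):
--     prev_ends = [None] + [e for _, e in path_segments]
--     return [lab
--             for prev, (s, e) in zip(prev_ends, path_segments)
--             for lab in (([s] if s != prev else []) + ([e] if e != s else []))]
-- ===== Notes on version B (the rewrite author's own statement) =====
-- stated objective: simpler
-- what changed: B replaces A's stateful chain-building and second dedup pass with a closed-form per-segment rule: zip the segments with their own shifted end labels and emit, for each segment independently, s unless it equals the previous segment's end and e unless it equals s.
import Mathlib
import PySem

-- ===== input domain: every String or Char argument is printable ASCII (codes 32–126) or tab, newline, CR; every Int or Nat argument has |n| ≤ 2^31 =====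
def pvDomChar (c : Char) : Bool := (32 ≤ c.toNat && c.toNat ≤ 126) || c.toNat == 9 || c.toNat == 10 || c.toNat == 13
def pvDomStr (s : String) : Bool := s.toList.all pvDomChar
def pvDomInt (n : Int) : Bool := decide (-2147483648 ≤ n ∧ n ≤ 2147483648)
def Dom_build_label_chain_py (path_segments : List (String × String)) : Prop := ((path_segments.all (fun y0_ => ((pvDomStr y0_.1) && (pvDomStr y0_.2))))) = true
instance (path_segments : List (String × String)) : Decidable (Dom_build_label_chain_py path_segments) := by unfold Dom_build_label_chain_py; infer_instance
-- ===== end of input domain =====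

-- B computes each segment's contribution independently (s unless it equals the previous segment's end, e unless it equals s) by zipping with the shifted end labels, instead of A's stateful chain build plus dedup pass; simpler.

-- ===== PORT A =====
-- loop body of A's first loop: append s if it differs from chain[-1], then append e
def pvChStep (ch : List String) (se : String × String) : List String :=
  (if ch.getLastD "" ≠ se.1 then ch ++ [se.1] else ch) ++ [se.2]

-- loop body of A's second loop: append lab if it differs from dedup[-1]
def pvDedupStep (d : List String) (lab : String) : List String :=
  if d.getLastD "" ≠ lab then d ++ [lab] else d

-- A's second loop: dedup = [chain[0]]; for lab in chain[1:] …
def pvDedup (chain : List String) : List String :=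
  match chain with
  | [] => []            -- unreachable: chain starts with two elements
  | c0 :: ct => List.foldl pvDedupStep [c0] ct

def build_label_chain_py (path_segments : List (String × String)) : List String :=
  match path_segments with
  | [] => []
  | (s0, e0) :: rest =>
    pvDedup (List.foldl pvChStep [s0, e0] rest)

-- ===== PORT B =====
-- one segment's labels, given the previous segment's end label (none before the first segment)
def pvContrib (prev : Option String) (se : String × String) : List String :=
  (if some se.1 ≠ prev then [se.1] else []) ++ (if se.2 ≠ se.1 then [se.2] else [])

def build_label_chain_py_alt (path_segments : List (String × String)) : List String :=
  let prev_ends : List (Option String) := none :: path_segments.map (fun se => some se.2)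
  (prev_ends.zip path_segments).flatMap (fun pe => pvContrib pe.1 pe.2)

-- ===== PRECONDITION & SPEC =====
def Spec_build_label_chain_py (path_segments : List (String × String)) (out : List String) : Prop := out = build_label_chain_py_alt path_segments
instance (path_segments : List (String × String)) (out : List String) : Decidable (Spec_build_label_chain_py path_segments out) := by unfold Spec_build_label_chain_py; infer_instance

-- ===== CLAIM (what is proved, stated in full; the proofs are below) =====
def Claim_equal_build_label_chain_py : Prop := ∀ (path_segments : List (String × String)), Dom_build_label_chain_py path_segments → Spec_build_label_chain_py path_segments (build_label_chain_py path_segments)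

-- ===== LEMMAS AND PROOFS =====

-- "collapse tail": labels of xs that differ from their predecessor (predecessor of the head is a)
def pvCt : String → List String → List String
  | _, [] => []
  | a, y :: ys => if a = y then pvCt y ys else y :: pvCt y ys

-- collapse of a whole (nonempty) list
def pvDc : List String → List String
  | [] => []
  | x :: t => x :: pvCt x t

-- recursive characterisation of B's per-segment emission
def pvG : Option String → List (String × String) → List String
  | _, [] => []
  | p, (s, e) :: rest =>
    (if some s ≠ p then [s] else []) ++ (if e ≠ s then [e] else []) ++ pvG (some e) rest

theorem pvCt_dup (ps : List String) (a x : String) (ys : List String) :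
    pvCt a (ps ++ x :: x :: ys) = pvCt a (ps ++ x :: ys) := by
  induction ps generalizing a with
  | nil =>
    simp only [List.nil_append, pvCt]
    by_cases h : a = x <;> simp [h]
  | cons p ps ih =>
    simp only [List.cons_append, pvCt]
    by_cases h : a = p <;> simp [h, ih]

theorem pvDc_dup (pre : List String) (x : String) (ys : List String) :
    pvDc (pre ++ x :: x :: ys) = pvDc (pre ++ x :: ys) := by
  cases pre with
  | nil => simp [pvDc, pvCt]
  | cons p ps => simp [pvDc, pvCt_dup]

theorem foldl_dedupStep (xs pre : List String) (x : String) :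
    List.foldl pvDedupStep (pre ++ [x]) xs = pre ++ [x] ++ pvCt x xs := by
  induction xs generalizing pre x with
  | nil => simp [pvCt]
  | cons y ys ih =>
    simp only [List.foldl_cons, pvDedupStep, List.getLastD_concat, pvCt]
    by_cases h : x = y
    · subst h
      simpa using ih pre x
    · simp only [h, not_false_iff, ne_eq, if_pos, if_neg]
      have := ih (pre ++ [x]) y
      simp only [List.append_assoc, List.cons_append, List.nil_append] at this ⊢
      simpa [h] using this

theorem pvDedup_eq_pvDc (chain : List String) : pvDedup chain = pvDc chain := by
  cases chain with
  | nil => rfl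
  | cons c0 ct =>
    have := foldl_dedupStep ct [] c0
    simpa [pvDedup, pvDc] using this

theorem foldl_chStep_dc (rest : List (String × String)) (pre : List String) (x : String) :
    pvDc (List.foldl pvChStep (pre ++ [x]) rest)
      = pvDc (pre ++ [x] ++ rest.flatMap (fun se => [se.1, se.2])) := by
  induction rest generalizing pre x with
  | nil => simp
  | cons p ps ih =>
    simp only [List.foldl_cons, List.flatMap_cons]
    by_cases h : x = p.1
    · have hstep : pvChStep (pre ++ [x]) p = (pre ++ [x]) ++ [p.2] := by
        simp [pvChStep, h]
      rw [hstep]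
      have := ih (pre ++ [x]) p.2
      simp only [List.append_assoc] at this ⊢
      rw [this]
      have hdup := pvDc_dup pre x (p.2 :: ps.flatMap (fun se => [se.1, se.2]))
      simp only [List.cons_append, List.nil_append] at hdup ⊢
      simp [← h, hdup]
    · have hstep : pvChStep (pre ++ [x]) p = (pre ++ [x] ++ [p.1]) ++ [p.2] := by
        simp [pvChStep, h]
      rw [hstep]
      have := ih (pre ++ [x] ++ [p.1]) p.2
      simp only [List.append_assoc, List.cons_append, List.nil_append] at this ⊢
      exact this

-- A side: collapsing the flat label list proceeds segment by segment
theorem pvCt_flat (segs : List (String × String)) (a : String) :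
    pvCt a (segs.flatMap (fun se => [se.1, se.2])) = pvG (some a) segs := by
  induction segs generalizing a with
  | nil => simp [pvCt, pvG]
  | cons p ps ih =>
    obtain ⟨s, e⟩ := p
    simp only [List.flatMap_cons, List.cons_append, List.nil_append, pvCt, pvG]
    by_cases h1 : a = s
    · by_cases h2 : s = e <;> simp [h1, h2, ih, eq_comm]
    · by_cases h2 : s = e
      · subst h2
        simp [h1, Ne.symm h1, ih]
      · simp [h1, Ne.symm h1, h2, Ne.symm h2, ih]

-- B side: zipping with the shifted end labels computes pvG
theorem zip_contrib (segs : List (String × String)) (p : Option String) :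
    ((p :: segs.map (fun se => some se.2)).zip segs).flatMap (fun pe => pvContrib pe.1 pe.2)
      = pvG p segs := by
  induction segs generalizing p with
  | nil => simp [pvG]
  | cons q qs ih =>
    obtain ⟨s, e⟩ := q
    simp only [List.map_cons, List.zip_cons_cons, List.flatMap_cons]
    rw [ih (some e)]
    simp [pvContrib, pvG]

-- ===== VERDICT (by name: the statement is the Claim_ definition above) =====
theorem build_label_chain_py_spec : Claim_equal_build_label_chain_py := by
  intro ps _
  unfold Spec_build_label_chain_py
  cases ps with
  | nil => rfl
  | cons hd rest =>
    obtain ⟨s0, e0⟩ := hd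
    have hA : build_label_chain_py ((s0, e0) :: rest)
        = pvDc (List.foldl pvChStep [s0, e0] rest) := by
      simp [build_label_chain_py, pvDedup_eq_pvDc]
    have hchain : pvDc (List.foldl pvChStep [s0, e0] rest)
        = pvDc ([s0, e0] ++ rest.flatMap (fun se => [se.1, se.2])) := by
      have := foldl_chStep_dc rest [s0] e0
      simpa using this
    have hB : build_label_chain_py_alt ((s0, e0) :: rest)
        = pvG none ((s0, e0) :: rest) := by
      simp only [build_label_chain_py_alt, List.map_cons]
      exact zip_contrib ((s0, e0) :: rest) none
    rw [hA, hchain, hB]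
    -- both sides equal [s0] ++ (optional e0) ++ pvG (some e0) rest
    simp only [List.cons_append, List.nil_append, pvDc, pvCt, pvG]
    by_cases h : s0 = e0 <;> simp [h, pvCt_flat, eq_comm]
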